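-- pv_equiv track=rewrite | github.com/jonathanbetz/slipstream | scripts/slipstream-analyze-reads.py | file_priority
-- ===== SOURCE A (Python) =====
-- def file_priority(file_path: str) -> int:
--     """Lower number = higher priority in display order."""
--     p = file_path.lower()
--     if "claude.md" in p:
--         return 0
--     if "readme" in p:
--         return 1
--     if any(w in p for w in ("architecture", "design", "spec", "docs/")):
--         return 2
--     if any(w in p for w in (".env", "config", "settings")):
--         return 3
--     return 4
-- ===== SOURCE B (Python) =====
-- _PATS = (
--     ("claude.md", 0),
--     ("readme", 1),
--     ("architecture", 2), ("design", 2), ("spec", 2), ("docs/", 2),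
--     (".env", 3), ("config", 3), ("settings", 3),
-- )
--
-- def file_priority(file_path: str) -> int:
--     """Lower number = higher priority in display order.
--
--     Single left-to-right scan of the lowercased path: at every position,
--     test which patterns start there (a naive multi-pattern matcher) and
--     keep a running minimum priority; 4 if nothing ever matches.
--     """
--     p = file_path.lower()
--     best = 4
--     for i in range(len(p)):
--         for sub, pri in _PATS:
--             if pri < best and p.startswith(sub, i):
--                 best = pri
--     return best
-- ===== Notes on version B (the rewrite author's own statement) =====
-- stated objective: alternative
-- what changed: Replaced the chain of substring-membership tests by a single left-to-right scan of the lowercased path that, at each position, checks which patterns start there (naive multi-pattern matching) and keeps a running minimum priority, defaulting to 4; correct because first-match in the ascending if-chain equals the minimum matched priority.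
import Mathlib
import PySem

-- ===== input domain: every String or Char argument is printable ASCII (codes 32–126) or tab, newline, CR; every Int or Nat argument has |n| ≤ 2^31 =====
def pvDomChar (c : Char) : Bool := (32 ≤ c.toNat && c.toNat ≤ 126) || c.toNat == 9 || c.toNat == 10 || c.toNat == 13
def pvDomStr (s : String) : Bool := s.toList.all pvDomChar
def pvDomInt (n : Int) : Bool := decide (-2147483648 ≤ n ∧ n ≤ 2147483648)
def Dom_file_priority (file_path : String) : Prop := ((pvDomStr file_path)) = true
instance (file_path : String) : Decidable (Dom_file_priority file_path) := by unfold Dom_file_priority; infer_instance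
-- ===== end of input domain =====

-- B replaces A's chain of substring-membership tests by one left-to-right scan of the
-- lowercased path, testing at each position which patterns start there and keeping a
-- running minimum priority (default 4); return value only, no side effects.

-- ===== PORT A =====
def file_priority (file_path : String) : Int :=
  let p := PySem.Str.lower file_path
  if PySem.Str.isIn "claude.md" p then 0
  else if PySem.Str.isIn "readme" p then 1
  else if (["architecture", "design", "spec", "docs/"].any fun w => PySem.Str.isIn w p) then 2
  else if ([".env", "config", "settings"].any fun w => PySem.Str.isIn w p) then 3
  else 4

-- ===== PORT B =====
def pvPats : List (List Char × Int) :=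
  [("claude.md".toList, 0), ("readme".toList, 1),
   ("architecture".toList, 2), ("design".toList, 2), ("spec".toList, 2), ("docs/".toList, 2),
   (".env".toList, 3), ("config".toList, 3), ("settings".toList, 3)]

-- Python's p.startswith(sub, i) with 0 ≤ i ≤ len(p) is exactly 'sub is a prefix of p dropped by i'.
def pvStep (p : List Char) (b : Int) (i : Nat) : Int :=
  pvPats.foldl (fun b r => if r.2 < b ∧ PySem.Chars.startswith (p.drop i) r.1 then r.2 else b) b

def file_priority_alt (file_path : String) : Int :=
  let p := (PySem.Str.lower file_path).toList
  (List.range p.length).foldl (pvStep p) 4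

-- ===== PRECONDITION & SPEC =====
def Spec_file_priority (file_path : String) (out : Int) : Prop := out = file_priority_alt file_path
instance (file_path : String) (out : Int) : Decidable (Spec_file_priority file_path out) := by unfold Spec_file_priority; infer_instance

-- ===== CLAIM (what is proved, stated in full; the proofs are below) =====
def Claim_equal_file_priority : Prop := ∀ (file_path : String), Dom_file_priority file_path → Spec_file_priority file_path (file_priority file_path)

-- ===== LEMMAS AND PROOFS =====

-- inner fold (one position): result ≤ start
theorem pvInner_le (p : List Char) (i : Nat) (l : List (List Char × Int)) :
    ∀ (b : Int),
      l.foldl (fun b r => if r.2 < b ∧ PySem.Chars.startswith (p.drop i) r.1 then r.2 else b) b ≤ b := by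
  induction l with
  | nil => intro b; simp
  | cons x l ih =>
    intro b
    simp only [List.foldl_cons]
    refine le_trans (ih _) ?_
    split_ifs with h
    · exact le_of_lt h.1
    · exact le_refl b

-- inner fold: result ≤ the priority of any pattern matching at this position
theorem pvInner_hit (p : List Char) (i : Nat) (l : List (List Char × Int)) :
    ∀ (b : Int) (r : List Char × Int), r ∈ l →
      PySem.Chars.startswith (p.drop i) r.1 = true →
      l.foldl (fun b r => if r.2 < b ∧ PySem.Chars.startswith (p.drop i) r.1 then r.2 else b) b ≤ r.2 := by
  induction l with
  | nil => intro b r hr; exact absurd hr (List.not_mem_nil)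
  | cons x l ih =>
    intro b r hr hc
    simp only [List.foldl_cons]
    rcases List.mem_cons.mp hr with h | h
    · subst h
      refine le_trans (pvInner_le p i l _) ?_
      split_ifs with h'
      · exact le_refl _
      · rw [not_and] at h'
        exact le_of_not_gt (fun hlt => (h' hlt) hc)
    · exact ih _ r h hc

-- inner fold: result is the start value or the priority of some pattern matching here
theorem pvInner_cases (p : List Char) (i : Nat) (l : List (List Char × Int)) :
    ∀ (b : Int),
      l.foldl (fun b r => if r.2 < b ∧ PySem.Chars.startswith (p.drop i) r.1 then r.2 else b) b = b ∨
      ∃ r ∈ l, PySem.Chars.startswith (p.drop i) r.1 = true ∧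
        l.foldl (fun b r => if r.2 < b ∧ PySem.Chars.startswith (p.drop i) r.1 then r.2 else b) b = r.2 := by
  induction l with
  | nil => intro b; left; rfl
  | cons x l ih =>
    intro b
    simp only [List.foldl_cons]
    rcases ih (if x.2 < b ∧ PySem.Chars.startswith (p.drop i) x.1 then x.2 else b) with h | ⟨r, hr, hc, he⟩
    · by_cases hx : x.2 < b ∧ PySem.Chars.startswith (p.drop i) x.1
      · right
        exact ⟨x, List.mem_cons_self, hx.2, by rw [h, if_pos hx]⟩
      · left; rw [h, if_neg hx]
    · right
      exact ⟨r, List.mem_cons_of_mem _ hr, hc, he⟩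

-- outer fold (all positions): result ≤ start
theorem pvOuter_le (p : List Char) (li : List Nat) :
    ∀ (b : Int), li.foldl (pvStep p) b ≤ b := by
  induction li with
  | nil => intro b; simp
  | cons i li ih =>
    intro b
    simp only [List.foldl_cons]
    exact le_trans (ih _) (pvInner_le p i pvPats b)

-- outer fold: result ≤ the priority of any pattern matching at any scanned position
theorem pvOuter_hit (p : List Char) (li : List Nat) :
    ∀ (b : Int) (i : Nat) (r : List Char × Int), i ∈ li → r ∈ pvPats →
      PySem.Chars.startswith (p.drop i) r.1 = true →
      li.foldl (pvStep p) b ≤ r.2 := by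
  induction li with
  | nil => intro b i r hi; exact absurd hi (List.not_mem_nil)
  | cons j li ih =>
    intro b i r hi hr hc
    simp only [List.foldl_cons]
    rcases List.mem_cons.mp hi with h | h
    · subst h
      exact le_trans (pvOuter_le p li _) (pvInner_hit p i pvPats b r hr hc)
    · exact ih _ i r h hr hc

-- outer fold: result is the start value or the priority of some pattern matching somewhere
theorem pvOuter_cases (p : List Char) (li : List Nat) :
    ∀ (b : Int),
      li.foldl (pvStep p) b = b ∨
      ∃ i ∈ li, ∃ r ∈ pvPats, PySem.Chars.startswith (p.drop i) r.1 = true ∧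
        li.foldl (pvStep p) b = r.2 := by
  induction li with
  | nil => intro b; left; rfl
  | cons j li ih =>
    intro b
    simp only [List.foldl_cons]
    rcases ih (pvStep p b j) with h | ⟨i, hi, r, hr, hc, he⟩
    · rcases pvInner_cases p j pvPats b with h' | ⟨r, hr, hc, he⟩
      · left; rw [h]; exact h'
      · right; exact ⟨j, List.mem_cons_self, r, hr, hc, by rw [h]; exact he⟩
    · right; exact ⟨i, List.mem_cons_of_mem _ hi, r, hr, hc, he⟩

-- a pattern occurs in p iff it starts at some scanned position (patterns are nonempty)
theorem pvIsIn_iff_hit (p sub : List Char) (hsub : sub ≠ []) :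
    PySem.Chars.isIn sub p = true ↔
      ∃ i, i ∈ List.range p.length ∧ PySem.Chars.startswith (p.drop i) sub = true := by
  rw [← PySem.Chars.exists_prefix_drop_iff_isIn]
  constructor
  · rintro ⟨j, hj⟩
    by_cases hlt : j < p.length
    · exact ⟨j, List.mem_range.mpr hlt, (PySem.Chars.startswith_iff _ _).mpr hj⟩
    · exfalso
      rw [List.drop_eq_nil_of_le (le_of_not_gt hlt)] at hj
      exact hsub (List.prefix_nil.mp hj)
  · rintro ⟨i, _, h⟩
    exact ⟨i, (PySem.Chars.startswith_iff _ _).mp h⟩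

-- A's chain value: ≤ 4, ≤ every matched priority, and 4 or some matched priority
theorem pvChain_spec (fp : String) :
    (file_priority (fp) ≤ 4) ∧
    (∀ r ∈ pvPats, PySem.Chars.isIn r.1 ((PySem.Str.lower (fp)).toList) = true →
        file_priority (fp) ≤ r.2) ∧
    (file_priority (fp) = 4 ∨
      ∃ r ∈ pvPats, PySem.Chars.isIn r.1 ((PySem.Str.lower (fp)).toList) = true ∧
        file_priority (fp) = r.2) := by
  unfold file_priority pvPats
  simp only [List.any_cons, List.any_nil, Bool.or_false, PySem.Str.isIn_eq,
    List.mem_cons, List.not_mem_nil, or_false, forall_eq_or_imp, forall_eq,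
    or_and_right, exists_or, exists_eq_left]
  generalize PySem.Chars.isIn "claude.md".toList (PySem.Str.lower (fp)).toList = b0
  generalize PySem.Chars.isIn "readme".toList (PySem.Str.lower (fp)).toList = b1
  generalize PySem.Chars.isIn "architecture".toList (PySem.Str.lower (fp)).toList = b2
  generalize PySem.Chars.isIn "design".toList (PySem.Str.lower (fp)).toList = b3
  generalize PySem.Chars.isIn "spec".toList (PySem.Str.lower (fp)).toList = b4
  generalize PySem.Chars.isIn "docs/".toList (PySem.Str.lower (fp)).toList = b5
  generalize PySem.Chars.isIn ".env".toList (PySem.Str.lower (fp)).toList = b6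
  generalize PySem.Chars.isIn "config".toList (PySem.Str.lower (fp)).toList = b7
  generalize PySem.Chars.isIn "settings".toList (PySem.Str.lower (fp)).toList = b8
  revert b0 b1 b2 b3 b4 b5 b6 b7 b8
  decide

theorem pvPats_ne_nil : ∀ r ∈ pvPats, r.1 ≠ [] := by decide

-- ===== VERDICT (by name: the statement is the Claim_ definition above) =====
theorem file_priority_spec : Claim_equal_file_priority := by
  intro fp _
  unfold Spec_file_priority
  obtain ⟨hA4, hAhit, hAcases⟩ := pvChain_spec fp
  set q := (PySem.Str.lower (fp)).toList with hq
  set A := file_priority (fp) with hAdef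
  have hBdef : file_priority_alt (fp) = (List.range q.length).foldl (pvStep q) 4 := rfl
  rw [hBdef]
  set B := (List.range q.length).foldl (pvStep q) 4 with hB
  -- A ≤ B
  have hAB : A ≤ B := by
    rcases pvOuter_cases q (List.range q.length) 4 with h | ⟨i, hi, r, hr, hc, he⟩
    · rw [← hB] at h; rw [h]; exact hA4
    · rw [← hB] at he; rw [he]
      refine hAhit r hr ?_
      exact ((pvIsIn_iff_hit q r.1 (pvPats_ne_nil r hr)).mpr ⟨i, hi, hc⟩)
  -- B ≤ A
  have hBA : B ≤ A := by
    rcases hAcases with h | ⟨r, hr, hin, he⟩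
    · rw [h, hB]; exact pvOuter_le q (List.range q.length) 4
    · rw [he, hB]
      obtain ⟨i, hi, hc⟩ := (pvIsIn_iff_hit q r.1 (pvPats_ne_nil r hr)).mp hin
      exact pvOuter_hit q (List.range q.length) 4 i r hi hr hc
  exact le_antisymm hAB hBA
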